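-- pv_equiv track=rewrite | github.com/tbohne/nesy_diag_bench | create_nesy_diag_problem_instance.py | generate_ground_truth_fault_paths
-- ===== SOURCE A (Python) =====
-- from collections import defaultdict
--
-- def find_paths_dfs(anomaly_graph, node, path=[]):
--     path = path + [node]  # not using append() because it wouldn't create a new list
--     if node not in anomaly_graph:
--         return [path]
--     paths = []
--     for node in anomaly_graph[node]:
--         paths.extend(find_paths_dfs(anomaly_graph, node, path))
--     return paths
--
-- def find_all_longest_paths(anomaly_graph):
--     all_paths = []
--     nodes_with_incoming_edges = [inc for targets in anomaly_graph.values() for inc in targets]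
--     for path_src in anomaly_graph:
--         if path_src in nodes_with_incoming_edges:
--             continue
--         all_paths.extend(find_paths_dfs(anomaly_graph, path_src))
--     return all_paths
--
-- def generate_ground_truth_fault_paths(component_net):
--     anomalous_components = [k for k in component_net.keys() if component_net[k][0]]
--
--     # finding all anomalous affecting components for all anomalous components,
--     # those are the edges in the final fault paths
--     edges = []
--     for anomaly in anomalous_components:
--         for aff_by in component_net[anomaly][1]:
--             if aff_by in anomalous_components:
--                 edges.append(aff_by + " -> " + anomaly)
--
--     edges = edges[::-1]  # has to be reversed, affected-by direction
--     # create adjacency lists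
--     anomaly_graph = defaultdict(list)
--     for edge in edges:
--         start, end = edge.split(' -> ')
--         anomaly_graph[start].append(end)
--
--     fault_paths = find_all_longest_paths(anomaly_graph)
--
--     # handle one-component-paths
--     for anomaly in anomalous_components:
--         if anomaly not in " ".join(edges):
--             fault_paths.append([anomaly])
--
--     return fault_paths
-- ===== SOURCE B (Python) =====
-- def generate_ground_truth_fault_paths(component_net):
--     anomalous = [k for k, v in component_net.items() if v[0]]
--     edges = [aff + " -> " + k
--              for k in anomalous
--              for aff in component_net[k][1]
--              if aff in anomalous]
--     edges.reverse()
--     adj = {}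
--     for e in edges:
--         s, t = e.split(' -> ')
--         if s in adj:
--             adj[s].append(t)
--         else:
--             adj[s] = [t]
--     targets = {t for ts in adj.values() for t in ts}
--     fault_paths = []
--     for src in adj:
--         if src in targets:
--             continue
--         stack = [(src, [src])]
--         while stack:
--             node, path = stack.pop()
--             children = adj.get(node)
--             if children is None:
--                 fault_paths.append(path)
--             else:
--                 for child in reversed(children):
--                     stack.append((child, path + [child]))
--     joined = " ".join(edges)
--     for a in anomalous:
--         if a not in joined:
--             fault_paths.append([a])
--     return fault_paths
-- ===== Notes on version B (the rewrite author's own statement) =====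
-- stated objective: alternative
-- what changed: The recursive DFS path enumeration (find_paths_dfs + find_all_longest_paths) is replaced by an explicit-stack iterative DFS that pops frames (node, path) and pushes children in reverse, yielding the same left-to-right preorder of root-to-leaf paths; anomalous components and edges are built by comprehensions instead of nested append loops, and sources are skipped via a target set instead of a flattened incoming-edge list.
-- outside the precondition, e.g. on generate_ground_truth_fault_paths({'a -> b': (True, ['a -> b'])}): A raises ValueError, B raises ValueError
import Mathlib
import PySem

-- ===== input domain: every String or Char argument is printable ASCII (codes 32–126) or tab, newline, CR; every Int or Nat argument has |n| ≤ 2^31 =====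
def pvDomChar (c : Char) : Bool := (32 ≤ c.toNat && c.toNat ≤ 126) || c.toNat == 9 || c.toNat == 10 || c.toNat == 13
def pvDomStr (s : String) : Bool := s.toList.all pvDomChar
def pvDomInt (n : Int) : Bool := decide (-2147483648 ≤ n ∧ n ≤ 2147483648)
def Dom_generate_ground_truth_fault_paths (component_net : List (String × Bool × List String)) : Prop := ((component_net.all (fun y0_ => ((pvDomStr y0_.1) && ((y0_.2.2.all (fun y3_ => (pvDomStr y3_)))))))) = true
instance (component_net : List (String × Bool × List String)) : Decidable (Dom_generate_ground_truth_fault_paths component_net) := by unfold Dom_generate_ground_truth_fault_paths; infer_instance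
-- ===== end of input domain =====

-- B replaces A's recursive DFS path enumeration by an explicit-stack iterative DFS (same preorder)
-- and builds anomalous components / edges by comprehensions instead of nested append loops (objective: alternative).

-- ===== PORT A =====

-- Python dict lookup component_net[k] (first match; keys are unique under Pre_); shared by both ports.
def pvLookup (net : List (String × Bool × List String)) (k : String) : Bool × List String :=
  ((net.find? (fun kv => kv.1 == k)).map (fun kv => kv.2)).getD (false, [])

-- 'start, end = edge.split(" -> ")'; none = the unpack raises ValueError (outside Pre_); shared by both ports.
def pvSplitEdge (e : String) : Option (String × String) :=
  match PySem.Str.split? e " -> " with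
  | some [s, t] => some (s, t)
  | _ => none

-- find_paths_dfs; the Nat fuel is only a recursion-depth guard for totality: fuel 0 on a non-leaf
-- is where Python's unbounded recursion would not return (cyclic graphs, excluded by Pre_).
def pvFindPathsDfs (g : PySem.Dict String (List String)) : Nat → String → List String → List (List String)
  | 0, node, path =>
    (match g.get? node with
     | none => [path ++ [node]]
     | some _ => [])
  | fuel+1, node, path =>
    let path' := path ++ [node]
    (match g.get? node with
     | none => [path']
     | some children => children.foldl (fun paths c => paths ++ pvFindPathsDfs g fuel c path') [])

-- find_all_longest_paths
def pvFindAllLongestPaths (g : PySem.Dict String (List String)) (fuel : Nat) : List (List String) :=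
  let incoming := g.values.flatMap (fun ts => ts)
  g.keys.foldl (fun all src => if src ∈ incoming then all else all ++ pvFindPathsDfs g fuel src []) []

def generate_ground_truth_fault_paths (component_net : List (String × Bool × List String)) : List (List String) :=
  let anomalous := (component_net.map (fun kv => kv.1)).filter (fun k => (pvLookup component_net k).1)
  let edges := anomalous.foldl (fun es a =>
      (pvLookup component_net a).2.foldl (fun es aff =>
        if aff ∈ anomalous then es ++ [aff ++ " -> " ++ a] else es) es) []
  let edges := edges.reverse
  let graph := edges.foldl (fun d e =>
      match pvSplitEdge e with
      | some (s, t) => d.modify s [] (fun l => l ++ [t])   -- defaultdict(list): graph[s].append(t)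
      | none => d) PySem.Dict.empty
  let fault_paths := pvFindAllLongestPaths graph edges.length
  anomalous.foldl (fun fp a =>
      if PySem.Str.isIn a (PySem.Str.join " " edges) then fp else fp ++ [[a]]) fault_paths

-- ===== PORT B =====

-- Fuel bound for B's while loop (number of iterations it can take from one root frame);
-- totality scaffolding only, not part of the computation.
def pvCost (adj : PySem.Dict String (List String)) : Nat → String → Nat
  | 0, _ => 1
  | f+1, node =>
    (match adj.get? node with
     | none => 1
     | some children => 1 + (children.map (fun c => pvCost adj f c)).sum)

-- B's 'while stack:' loop; the stack's head is its top (Python pushes reversed children onto the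
-- end and pops from the end, which is the same as putting children in order at the front).
-- Each frame carries a depth guard mirroring pvFindPathsDfs's fuel; the outer Nat is iteration fuel.
def pvLoop (adj : PySem.Dict String (List String)) :
    Nat → List (Nat × String × List String) → List (List String) → List (List String)
  | _, [], acc => acc
  | 0, _ :: _, acc => acc
  | g+1, (f, node, path) :: stack, acc =>
    (match adj.get? node with
     | none => pvLoop adj g stack (acc ++ [path])
     | some children =>
       match f with
       | 0 => pvLoop adj g stack acc
       | f'+1 => pvLoop adj g (children.map (fun c => (f', c, path ++ [c])) ++ stack) acc)

def generate_ground_truth_fault_paths_alt (component_net : List (String × Bool × List String)) : List (List String) :=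
  let anomalous := component_net.filterMap (fun kv => if kv.2.1 then some kv.1 else none)
  let edges := (anomalous.flatMap (fun k =>
      ((pvLookup component_net k).2.filter (fun aff => decide (aff ∈ anomalous))).map
        (fun aff => aff ++ " -> " ++ k))).reverse
  let adj := edges.foldl (fun d e =>
      match pvSplitEdge e with
      | some (s, t) => if d.contains s then d.modify s [] (fun l => l ++ [t]) else d.insert s [t]
      | none => d) PySem.Dict.empty
  let targets := PySem.Set.ofList (adj.values.flatMap (fun ts => ts))
  let fault_paths := adj.keys.foldl (fun fp src =>
      if PySem.Set.contains targets src then fp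
      else pvLoop adj (pvCost adj edges.length src) [(edges.length, src, [src])] fp) []
  let joined := PySem.Str.join " " edges
  anomalous.foldl (fun fp a => if PySem.Str.isIn a joined then fp else fp ++ [[a]]) fault_paths

-- ===== PRECONDITION & SPEC =====

-- helpers for Pre_ only: the anomaly-graph successor relation of the input and its iterated closure
def pvSuccsPre (net : List (String × Bool × List String)) (a : String) : List String :=
  net.filterMap (fun kv => if kv.2.1 = true ∧ a ∈ kv.2.2 then some kv.1 else none)

def pvIsAnomPre (net : List (String × Bool × List String)) (a : String) : Bool :=
  net.any (fun kv => kv.1 == a && kv.2.1)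

def pvReachPre (net : List (String × Bool × List String)) : Nat → List String → List String
  | 0, s => s
  | n+1, s => pvReachPre net n (PySem.List.dedup (s ++ s.flatMap (fun a => pvSuccsPre net a)))

-- Pre_ excludes: (i) duplicate keys (a Python dict argument cannot carry them); (ii) inputs where
-- some edge string "aff -> anomaly" does not split back into exactly its two endpoints (extra " -> "
-- occurrences coming from the names): there the two-variable unpack raises ValueError in A, or the
-- parse is shifted (conservatively excluded, see cites); (iii) inputs where a cycle of the anomalous
-- affected-by relation is reachable from a source node, where A's unbounded DFS recursion does not
-- return (RecursionError).
def Pre_generate_ground_truth_fault_paths (component_net : List (String × Bool × List String)) : Prop :=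
  (component_net.map (fun kv => kv.1)).Nodup
  ∧ (∀ kv ∈ component_net, kv.2.1 = true → ∀ a ∈ kv.2.2, pvIsAnomPre component_net a = true →
       PySem.Str.split? (a ++ " -> " ++ kv.1) " -> " = some [a, kv.1])
  ∧ (∀ kv ∈ component_net,
       (kv.2.1 = true ∧ pvSuccsPre component_net kv.1 ≠ []
          ∧ ∀ a ∈ kv.2.2, pvIsAnomPre component_net a = false) →
       ∀ x ∈ pvReachPre component_net component_net.length [kv.1],
         x ∉ pvReachPre component_net component_net.length (pvSuccsPre component_net x))

instance (component_net : List (String × Bool × List String)) : Decidable (Pre_generate_ground_truth_fault_paths component_net) := by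
  unfold Pre_generate_ground_truth_fault_paths; infer_instance

def pvWitness_generate_ground_truth_fault_paths : (List (String × Bool × List String)) :=
  [("a", (true, ["b"])), ("b", (false, []))]

def Spec_generate_ground_truth_fault_paths (component_net : List (String × Bool × List String)) (out : List (List String)) : Prop := out = generate_ground_truth_fault_paths_alt component_net
instance (component_net : List (String × Bool × List String)) (out : List (List String)) : Decidable (Spec_generate_ground_truth_fault_paths component_net out) := by unfold Spec_generate_ground_truth_fault_paths; infer_instance

-- ===== CLAIM (what is proved, stated in full; the proofs are below) =====
def Claim_equal_generate_ground_truth_fault_paths : Prop := ∀ (component_net : List (String × Bool × List String)), Dom_generate_ground_truth_fault_paths component_net → Pre_generate_ground_truth_fault_paths component_net → Spec_generate_ground_truth_fault_paths component_net (generate_ground_truth_fault_paths component_net)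

-- ===== LEMMAS AND PROOFS =====

-- value contributed by one stack frame (path already contains the frame's node)
def pvFrameVal (g : PySem.Dict String (List String)) : Nat → String → List String → List (List String)
  | 0, node, p =>
    (match g.get? node with
     | none => [p]
     | some _ => [])
  | f+1, node, p =>
    (match g.get? node with
     | none => [p]
     | some children => children.foldl (fun acc c => acc ++ pvFrameVal g f c (p ++ [c])) [])

theorem pvFindPathsDfs_eq_frame (g : PySem.Dict String (List String)) :
    ∀ (f : Nat) (node : String) (path : List String),
      pvFindPathsDfs g f node path = pvFrameVal g f node (path ++ [node]) := by
  intro f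
  induction f with
  | zero => intro node path; simp [pvFindPathsDfs, pvFrameVal]
  | succ f ih =>
    intro node path
    simp only [pvFindPathsDfs, pvFrameVal]
    cases g.get? node with
    | none => rfl
    | some children =>
      simp only
      congr 1
      funext acc c
      rw [ih]

theorem pvCost_pos (adj : PySem.Dict String (List String)) (f : Nat) (node : String) :
    1 ≤ pvCost adj f node := by
  cases f with
  | zero => simp [pvCost]
  | succ f => simp only [pvCost]; cases adj.get? node <;> simp

theorem pvLoop_spec (adj : PySem.Dict String (List String)) :
    ∀ (g : Nat) (stack : List (Nat × String × List String)) (acc : List (List String)),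
      (stack.map (fun fr => pvCost adj fr.1 fr.2.1)).sum ≤ g →
      pvLoop adj g stack acc
        = acc ++ (stack.map (fun fr => pvFrameVal adj fr.1 fr.2.1 fr.2.2)).flatten := by
  intro g
  induction g with
  | zero =>
    intro stack acc h
    cases stack with
    | nil => simp [pvLoop]
    | cons fr rest =>
      exfalso
      have h1 := pvCost_pos adj fr.1 fr.2.1
      simp [List.map_cons] at h
      omega
  | succ g ih =>
    intro stack acc h
    cases stack with
    | nil => simp [pvLoop]
    | cons fr rest =>
      obtain ⟨f, node, path⟩ := fr
      simp only [pvLoop]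
      simp only [List.map_cons, List.sum_cons] at h
      cases hg : adj.get? node with
      | none =>
        have hc : pvCost adj f node = 1 := by
          cases f <;> simp [pvCost, hg]
        rw [ih rest (acc ++ [path]) (by omega)]
        have hv : pvFrameVal adj f node path = [path] := by
          cases f <;> simp [pvFrameVal, hg]
        simp [hv, List.append_assoc]
      | some children =>
        cases f with
        | zero =>
          have hc : pvCost adj 0 node = 1 := by simp [pvCost]
          rw [ih rest acc (by omega)]
          have hv : pvFrameVal adj 0 node path = [] := by simp [pvFrameVal, hg]
          simp [hv]
        | succ f' =>
          dsimp only
          have hc : pvCost adj (f' + 1) node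
              = 1 + (children.map (fun c => pvCost adj f' c)).sum := by
            simp [pvCost, hg]
          have hb : ((children.map (fun c => (f', c, path ++ [c])) ++ rest).map
              (fun fr => pvCost adj fr.1 fr.2.1)).sum ≤ g := by
            simp only [List.map_append, List.sum_append, List.map_map, Function.comp_def]
            omega
          rw [ih _ acc hb]
          have hv : pvFrameVal adj (f' + 1) node path
              = (children.map (fun c => pvFrameVal adj f' c (path ++ [c]))).flatten := by
            simp only [pvFrameVal, hg]
            rw [PySem.List.foldl_append_eq_flatMap]
            simp [List.flatMap]
          simp [hv, List.map_map, Function.comp_def]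

-- one root frame: B's loop computes exactly A's recursive DFS from that source
theorem pvLoop_root (adj : PySem.Dict String (List String)) (F : Nat) (src : String)
    (fp : List (List String)) :
    pvLoop adj (pvCost adj F src) [(F, src, [src])] fp = fp ++ pvFindPathsDfs adj F src [] := by
  rw [pvLoop_spec adj (pvCost adj F src) [(F, src, [src])] fp (by simp)]
  rw [pvFindPathsDfs_eq_frame]
  simp

-- with unique keys, A's keys()-based filter equals B's items()-based comprehension
theorem pvAnoms_eq :
    ∀ (net : List (String × Bool × List String)), (net.map (fun kv => kv.1)).Nodup →
      (net.map (fun kv => kv.1)).filter (fun k => (pvLookup net k).1)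
        = net.filterMap (fun kv => if kv.2.1 then some kv.1 else none) := by
  intro net
  induction net with
  | nil => intro _; rfl
  | cons hd tl ih =>
    intro hnd
    obtain ⟨k₀, v₀⟩ := hd
    simp only [List.map_cons, List.nodup_cons] at hnd
    obtain ⟨hk₀, hnd'⟩ := hnd
    have hhead : pvLookup ((k₀, v₀) :: tl) k₀ = v₀ := by
      simp [pvLookup]
    have htail : ∀ x ∈ tl.map (fun kv => kv.1),
        pvLookup ((k₀, v₀) :: tl) x = pvLookup tl x := by
      intro x hx
      have hne : ¬ (k₀ == x) = true := by
        simp only [beq_iff_eq]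
        intro h; exact hk₀ (h ▸ hx)
      simp [pvLookup, hne]
    simp only [List.map_cons, List.filter_cons, List.filterMap_cons, hhead]
    rw [List.filter_congr (fun x hx => by rw [htail x hx])]
    rw [ih hnd']
    cases hv : v₀.1 <;> simp

-- B's dict-build step equals A's defaultdict step
theorem pvStep_eq (d : PySem.Dict String (List String)) (s t : String) :
    (if d.contains s then d.modify s [] (fun l => l ++ [t]) else d.insert s [t])
      = d.modify s [] (fun l => l ++ [t]) := by
  by_cases h : d.contains s = true
  · simp [h]
  · simp only [h, if_false, Bool.false_eq_true]
    simp only [PySem.Dict.modify]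
    rw [PySem.Dict.getD_of_not_contains d [] (by simpa using h)]
    simp

theorem generate_ground_truth_fault_paths_eq
    (net : List (String × Bool × List String))
    (hnd : (net.map (fun kv => kv.1)).Nodup) :
    generate_ground_truth_fault_paths net = generate_ground_truth_fault_paths_alt net := by
  simp only [generate_ground_truth_fault_paths, generate_ground_truth_fault_paths_alt]
  rw [pvAnoms_eq net hnd]
  set an := net.filterMap (fun kv => if kv.2.1 then some kv.1 else none) with han
  -- the edge lists agree
  have hedges :
      (an.foldl (fun es a =>
        (pvLookup net a).2.foldl (fun es aff =>
          if aff ∈ an then es ++ [aff ++ " -> " ++ a] else es) es) [])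
      = an.flatMap (fun k =>
          ((pvLookup net k).2.filter (fun aff => decide (aff ∈ an))).map
            (fun aff => aff ++ " -> " ++ k)) := by
    have hinner : ∀ (a : String) (es : List String),
        (pvLookup net a).2.foldl (fun es aff =>
          if aff ∈ an then es ++ [aff ++ " -> " ++ a] else es) es
        = es ++ ((pvLookup net a).2.filter (fun aff => decide (aff ∈ an))).map
            (fun aff => aff ++ " -> " ++ a) := by
      intro a es
      rw [PySem.List.foldl_append_ite]
    calc (an.foldl (fun es a =>
            (pvLookup net a).2.foldl (fun es aff =>
              if aff ∈ an then es ++ [aff ++ " -> " ++ a] else es) es) [])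
        = an.foldl (fun es a =>
            es ++ ((pvLookup net a).2.filter (fun aff => decide (aff ∈ an))).map
              (fun aff => aff ++ " -> " ++ a)) [] := by
          exact List.foldl_ext _ _ _ (fun es a _ => hinner a es)
      _ = _ := by rw [PySem.List.foldl_append_eq_flatMap]; simp
  rw [hedges]
  set edges := (an.flatMap (fun k =>
      ((pvLookup net k).2.filter (fun aff => decide (aff ∈ an))).map
        (fun aff => aff ++ " -> " ++ k))).reverse with hedgesdef
  -- the adjacency dicts agree
  have hgraph :
      (edges.foldl (fun d e =>
        match pvSplitEdge e with
        | some (s, t) => if d.contains s then d.modify s [] (fun l => l ++ [t]) else d.insert s [t]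
        | none => d) PySem.Dict.empty)
      = edges.foldl (fun d e =>
          match pvSplitEdge e with
          | some (s, t) => d.modify s [] (fun l => l ++ [t])
          | none => d) PySem.Dict.empty := by
    apply List.foldl_ext
    intro d e _
    cases h : pvSplitEdge e with
    | none => rfl
    | some st => obtain ⟨s, t⟩ := st; simpa using pvStep_eq d s t
  rw [hgraph]
  set graph := edges.foldl (fun d e =>
      match pvSplitEdge e with
      | some (s, t) => d.modify s [] (fun l => l ++ [t])
      | none => d) PySem.Dict.empty with hgraphdef
  -- the source-by-source path enumerations agree
  have hpaths : pvFindAllLongestPaths graph edges.length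
      = graph.keys.foldl (fun fp src =>
          if PySem.Set.contains (PySem.Set.ofList (graph.values.flatMap (fun ts => ts))) src then fp
          else pvLoop graph (pvCost graph edges.length src) [(edges.length, src, [src])] fp) [] := by
    unfold pvFindAllLongestPaths
    apply List.foldl_ext
    intro fp src _
    have hmem : (PySem.Set.contains (PySem.Set.ofList (graph.values.flatMap (fun ts => ts))) src)
        = decide (src ∈ graph.values.flatMap (fun ts => ts)) := by
      by_cases h : src ∈ graph.values.flatMap (fun ts => ts)
      · simp only [h, decide_true]
        exact (PySem.Set.contains_iff _ _).2 ((PySem.Set.mem_ofList _ _).2 h)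
      · simp only [h, decide_false]
        exact Bool.eq_false_iff.mpr
          (fun hc => h ((PySem.Set.mem_ofList _ _).1 ((PySem.Set.contains_iff _ _).1 hc)))
    rw [hmem]
    by_cases h : src ∈ graph.values.flatMap (fun ts => ts)
    · rw [if_pos h, if_pos (decide_eq_true h)]
    · rw [if_neg h, if_neg (by simpa using h), pvLoop_root]
  rw [hpaths]

-- ===== VERDICT (by name: the statement is the Claim_ definition above) =====
theorem generate_ground_truth_fault_paths_spec : Claim_equal_generate_ground_truth_fault_paths := by
  intro net _ hpre
  unfold Spec_generate_ground_truth_fault_paths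
  exact generate_ground_truth_fault_paths_eq net hpre.1
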